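-- pv_equiv track=rewrite | github.com/hhaoz/vnpt-haha | main.py | _format_choices_display
-- ===== SOURCE A (Python) =====
-- import string
--
-- def _format_choices_display(choices: list[str]) -> str:
--     """Format choices for display."""
--     option_labels = string.ascii_uppercase
--     lines = []
--     for i in range(0, len(choices), 2):
--         line_parts = []
--         for j in range(2):
--             idx = i + j
--             if idx < len(choices):
--                 label = option_labels[idx] if idx < len(option_labels) else str(idx)
--                 line_parts.append(f"{label}. {choices[idx]:<30}")
--         if line_parts:
--             lines.append("   " + " ".join(line_parts))
--     return "\n".join(lines)
-- ===== SOURCE B (Python) =====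
-- import string
--
--
-- def _format_choices_display(choices: list[str]) -> str:
--     """Format choices for display."""
--     cells = [
--         f"{string.ascii_uppercase[i] if i < 26 else str(i)}. {c:<30}"
--         for i, c in enumerate(choices)
--     ]
--     it = iter(cells)
--     lines = []
--     for a in it:
--         b = next(it, None)
--         lines.append("   " + a if b is None else "   " + a + " " + b)
--     return "\n".join(lines)
-- ===== Notes on version B (the rewrite author's own statement) =====
-- stated objective: alternative
-- what changed: Replaces A's step-2 index loop with a bounds-checked inner index loop by a single map building all formatted cells, then one iterator pass that consumes the cells two at a time (next(it, None)) to form the lines, and a final join.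
import Mathlib
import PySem

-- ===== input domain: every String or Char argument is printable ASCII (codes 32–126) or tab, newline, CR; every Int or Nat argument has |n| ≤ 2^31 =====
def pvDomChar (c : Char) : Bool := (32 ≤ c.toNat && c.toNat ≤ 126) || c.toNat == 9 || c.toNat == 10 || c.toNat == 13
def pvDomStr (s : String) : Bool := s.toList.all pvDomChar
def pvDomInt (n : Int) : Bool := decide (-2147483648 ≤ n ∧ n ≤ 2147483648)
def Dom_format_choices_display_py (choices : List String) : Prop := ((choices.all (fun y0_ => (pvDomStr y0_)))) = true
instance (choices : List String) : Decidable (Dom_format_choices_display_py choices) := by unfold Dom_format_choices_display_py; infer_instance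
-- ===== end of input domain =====

-- B replaces A's step-2 index loop with a bounds-checked inner loop by one map building all cells, then one pass pairing consecutive cells (objective: alternative).

-- ===== PORT A =====
-- f"{s:<30}": left-justify with spaces to width 30 (exact for Python's :<30 on str)
def pyLjust30 (s : String) : String := String.ofList (s.toList ++ List.replicate (30 - s.toList.length) ' ')

def format_choices_display_py (choices : List String) : String :=
  let optionLabels : String := "ABCDEFGHIJKLMNOPQRSTUVWXYZ"
  let lines : List String :=
    (PySem.List.pyRange 0 (PySem.List.len choices) 2).foldl (fun lines i =>
      let lineParts : List String :=
        (PySem.List.pyRange 0 2 1).foldl (fun lp j =>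
          let idx := i + j
          if idx < PySem.List.len choices then
            let label := if idx < PySem.Str.len optionLabels
                         then String.ofList (PySem.Str.pyGet? optionLabels idx).toList
                         else PySem.Int.toStr idx
            lp ++ [label ++ ". " ++ pyLjust30 (PySem.List.pyGetD choices idx "")]
          else lp) []
      if lineParts ≠ [] then lines ++ ["   " ++ PySem.Str.join " " lineParts] else lines) []
  PySem.Str.join "\n" lines

-- ===== PORT B =====
def altCell (i : Int) (c : String) : String :=
  (if i < 26 then String.ofList (PySem.Str.pyGet? "ABCDEFGHIJKLMNOPQRSTUVWXYZ" i).toList else PySem.Int.toStr i)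
    ++ ". " ++ pyLjust30 c

-- the 'for a in it: b = next(it, None); lines.append(...)' pass: consume cells two at a time
def pairLines : List String → List String
  | [] => []
  | [a] => ["   " ++ a]
  | a :: b :: rest => ("   " ++ a ++ " " ++ b) :: pairLines rest

def format_choices_display_py_alt (choices : List String) : String :=
  let cells := (PySem.List.enumerate choices 0).map (fun p => altCell p.1 p.2)
  PySem.Str.join "\n" (pairLines cells)

-- ===== PRECONDITION & SPEC =====
def Spec_format_choices_display_py (choices : List String) (out : String) : Prop := out = format_choices_display_py_alt choices
instance (choices : List String) (out : String) : Decidable (Spec_format_choices_display_py choices out) := by unfold Spec_format_choices_display_py; infer_instance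

-- ===== CLAIM (what is proved, stated in full; the proofs are below) =====
def Claim_equal_format_choices_display_py : Prop := ∀ (choices : List String), Dom_format_choices_display_py choices → Spec_format_choices_display_py choices (format_choices_display_py choices)

-- ===== LEMMAS AND PROOFS =====

-- reference line list: recursion on the choices two at a time, carrying the start index
def linesRef : List String → Int → List String
  | [], _ => []
  | [a], k => ["   " ++ altCell k a]
  | a :: b :: rest, k =>
      ("   " ++ altCell k a ++ " " ++ altCell (k+1) b) :: linesRef rest (k+2)

theorem strJoin_pair (a b : String) : PySem.Str.join " " [a, b] = a ++ " " ++ b := by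
  simp only [PySem.Str.join, List.map_cons, List.map_nil, PySem.Chars.join_cons_cons,
    PySem.Chars.join_singleton, String.ofList_append, String.ofList_toList, String.append_assoc]

theorem strJoin_single (a : String) : PySem.Str.join " " [a] = a := by
  simp only [PySem.Str.join, List.map_cons, List.map_nil, PySem.Chars.join_singleton,
    String.ofList_toList]

theorem pyRangeTwo_nil (a b : Int) (h : b ≤ a) : PySem.List.pyRange a b 2 = [] := by
  rw [PySem.List.pyRange_of_pos a b (by norm_num)]
  rw [if_neg (by omega)]
  simp

theorem pyRangeTwo_cons (a b : Int) (h : a < b) :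
    PySem.List.pyRange a b 2 = a :: PySem.List.pyRange (a+2) b 2 := by
  rw [PySem.List.pyRange_of_pos a b (by norm_num),
      PySem.List.pyRange_of_pos (a+2) b (by norm_num)]
  rw [if_pos h]
  by_cases h2 : a + 2 < b
  · rw [if_pos h2]
    have h1 : ((b - a + 2 - 1)/2).toNat = ((b - (a+2) + 2 - 1)/2).toNat + 1 := by omega
    rw [h1, List.range_succ_eq_map]
    simp only [List.map_cons, List.map_map, List.cons.injEq]
    refine ⟨by push_cast; ring, List.map_congr_left ?_⟩
    intro x _
    simp only [Function.comp]
    push_cast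
    ring
  · rw [if_neg h2]
    have h1 : ((b - a + 2 - 1)/2).toNat = 1 := by omega
    rw [h1]
    simp

theorem linesRef_B (xs : List String) : ∀ (k : Int),
    pairLines ((PySem.List.enumerate xs k).map (fun p => altCell p.1 p.2)) = linesRef xs k := by
  induction xs using pairLines.induct with
  | case1 => intro k; simp [PySem.List.enumerate, pairLines, linesRef]
  | case2 a => intro k; simp [PySem.List.enumerate, pairLines, linesRef]
  | case3 a b rest ih =>
      intro k
      have h2 : k + 1 + 1 = k + 2 := by ring
      simp only [PySem.List.enumerate, List.map_cons, pairLines, linesRef, h2, ih (k+2)]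

theorem linesRef_A_gen (choices : List String) : ∀ (m : Nat) (k : Int) (acc : List String), 0 ≤ k →
    (PySem.List.len choices - k).toNat = m →
    (PySem.List.pyRange k (PySem.List.len choices) 2).foldl (fun lines i =>
      let lineParts : List String :=
        (PySem.List.pyRange 0 2 1).foldl (fun lp j =>
          let idx := i + j
          if idx < PySem.List.len choices then
            let label := if idx < PySem.Str.len "ABCDEFGHIJKLMNOPQRSTUVWXYZ"
                         then String.ofList (PySem.Str.pyGet? "ABCDEFGHIJKLMNOPQRSTUVWXYZ" idx).toList
                         else PySem.Int.toStr idx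
            lp ++ [label ++ ". " ++ pyLjust30 (PySem.List.pyGetD choices idx "")]
          else lp) []
      if lineParts ≠ [] then lines ++ ["   " ++ PySem.Str.join " " lineParts] else lines) acc
    = acc ++ linesRef (choices.drop k.toNat) k := by
  intro m
  induction m using Nat.strong_induction_on with
  | _ m ih =>
    intro k acc hk hm
    by_cases hend : PySem.List.len choices ≤ k
    · rw [pyRangeTwo_nil _ _ hend]
      have : choices.drop k.toNat = [] := by
        apply List.drop_eq_nil_of_le
        simp [PySem.List.len] at hend ⊢
        omega
      simp [this, linesRef]
    · push Not at hend
      have hkn : k.toNat < choices.length := by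
        simp only [PySem.List.len] at hend; omega
      have hr : PySem.List.pyRange 0 2 1 = [0, 1] := by decide
      have h26 : PySem.Str.len "ABCDEFGHIJKLMNOPQRSTUVWXYZ" = 26 := by decide
      have hkk : (k + 2).toNat = k.toNat + 2 := by omega
      have hget1 : PySem.List.pyGetD choices k "" = choices[k.toNat] :=
        PySem.List.pyGetD_eq_getElem choices "" hk (by simp only [PySem.List.len] at hend; omega)
      rw [pyRangeTwo_cons _ _ hend, List.foldl_cons,
          ih (PySem.List.len choices - (k + 2)).toNat
            (by simp only [PySem.List.len] at hm ⊢; omega) (k + 2) _ (by omega) rfl, hkk]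
      by_cases hk1 : k + 1 < PySem.List.len choices
      · have hkn1 : k.toNat + 1 < choices.length := by
          simp only [PySem.List.len] at hk1; omega
        have hget2 : PySem.List.pyGetD choices (k + 1) "" = choices[k.toNat + 1] := by
          rw [PySem.List.pyGetD_eq_getElem choices "" (by omega) (by omega)]
          simp only [show (k + 1).toNat = k.toNat + 1 from by omega]
        have hdrop : choices.drop k.toNat =
            choices[k.toNat] :: choices[k.toNat + 1] :: choices.drop (k.toNat + 2) := by
          rw [List.drop_eq_getElem_cons hkn, List.drop_eq_getElem_cons hkn1]
        rw [hdrop]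
        simp only [hr, List.foldl_cons, List.foldl_nil, add_zero, if_pos hend, if_pos hk1,
          List.nil_append, hget1, hget2, linesRef, altCell, h26]
        rw [if_pos (by simp)]
        simp [List.append_assoc, strJoin_pair, String.append_assoc]
      · have hkn1 : choices.length ≤ k.toNat + 1 := by
          simp only [PySem.List.len] at hk1; omega
        have hdrop : choices.drop k.toNat = [choices[k.toNat]] := by
          rw [List.drop_eq_getElem_cons hkn]
          simp [List.drop_eq_nil_of_le, hkn1]
        have hdrop2 : choices.drop (k.toNat + 2) = [] :=
          List.drop_eq_nil_of_le (by omega)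
        rw [hdrop, hdrop2]
        simp only [hr, List.foldl_cons, List.foldl_nil, add_zero, if_pos hend, if_neg hk1,
          List.nil_append, hget1, linesRef, altCell, h26]
        rw [if_pos (by simp)]
        simp [strJoin_single]

theorem linesRef_A (choices : List String) :
    (PySem.List.pyRange 0 (PySem.List.len choices) 2).foldl (fun lines i =>
      let lineParts : List String :=
        (PySem.List.pyRange 0 2 1).foldl (fun lp j =>
          let idx := i + j
          if idx < PySem.List.len choices then
            let label := if idx < PySem.Str.len "ABCDEFGHIJKLMNOPQRSTUVWXYZ"
                         then String.ofList (PySem.Str.pyGet? "ABCDEFGHIJKLMNOPQRSTUVWXYZ" idx).toList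
                         else PySem.Int.toStr idx
            lp ++ [label ++ ". " ++ pyLjust30 (PySem.List.pyGetD choices idx "")]
          else lp) []
      if lineParts ≠ [] then lines ++ ["   " ++ PySem.Str.join " " lineParts] else lines) []
    = linesRef choices 0 := by
  have := linesRef_A_gen choices (PySem.List.len choices - 0).toNat 0 [] le_rfl rfl
  simpa using this

-- ===== VERDICT (by name: the statement is the Claim_ definition above) =====
theorem format_choices_display_py_spec : Claim_equal_format_choices_display_py := by
  intro choices _
  unfold Spec_format_choices_display_py format_choices_display_py format_choices_display_py_alt
  simp only []
  rw [linesRef_A choices, ← linesRef_B choices 0]
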